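-- pv_equiv track=rewrite | github.com/pypi-data/pypi-mirror-30 | packages/hep-spt/hep_spt-0.0.0.dev2-py2.py3-none-any.whl/hep_spt/plotting.py | opt_fig_div
-- ===== SOURCE A (Python) =====
-- import math, os
--
-- def opt_fig_div( naxes ):
--     '''
--     Get the optimal figure division for a given number of axes, where
--     all the axes have the same dimensions.
--
--     :param naxes: number of axes to plot in the figure.
--     :type naxes: int
--     :returns: number of rows and columns of axes to draw.
--     :rtype: int, int
--     '''
--     nstsq = int(round(math.sqrt(naxes)))
--
--     if nstsq**2 > naxes:
--         nx = nstsq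
--         ny = nstsq
--     else:
--         nx = nstsq
--         ny = nstsq
--         while nx*ny < naxes:
--             ny += 1
--
--     return nx, ny
-- ===== SOURCE B (Python) =====
-- import math
--
-- def opt_fig_div(naxes):
--     nstsq = math.isqrt(naxes)
--     if naxes - nstsq * nstsq > nstsq:
--         nstsq += 1
--     if nstsq * nstsq < naxes:
--         return nstsq, -(-naxes // nstsq)
--     return nstsq, nstsq
-- ===== Notes on version B (the rewrite author's own statement) =====
-- stated objective: simpler
-- what changed: Replaces float round(sqrt) plus an incrementing while loop by integer math.isqrt with a nearest-root correction and a single ceiling division -(-naxes // nstsq).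
import Mathlib
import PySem

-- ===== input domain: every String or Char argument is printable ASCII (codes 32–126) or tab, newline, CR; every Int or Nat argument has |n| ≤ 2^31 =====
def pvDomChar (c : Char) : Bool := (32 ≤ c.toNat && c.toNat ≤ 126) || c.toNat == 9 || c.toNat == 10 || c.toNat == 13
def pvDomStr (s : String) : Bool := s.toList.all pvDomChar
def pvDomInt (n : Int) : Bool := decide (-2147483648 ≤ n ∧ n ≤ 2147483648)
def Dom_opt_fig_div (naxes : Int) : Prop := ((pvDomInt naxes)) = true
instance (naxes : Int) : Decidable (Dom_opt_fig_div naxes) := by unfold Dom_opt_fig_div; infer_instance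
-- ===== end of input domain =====

-- B replaces the float round(sqrt) + incrementing while loop by integer isqrt and one ceiling division (objective: simpler).

-- ===== PORT A =====
-- Exact model of Python's `int(round(math.sqrt(naxes)))` for 0 ≤ naxes ≤ 2^31: the nearest
-- integer to √naxes (the correctly rounded double sqrt cannot cross a half-integer boundary
-- in this range, and ties cannot occur since naxes ≠ k²+k+1/4).
def pyRoundSqrt (naxes : Int) : Int :=
  let r : Int := (Nat.sqrt naxes.toNat : Int)
  if naxes - r * r > r then r + 1 else r

-- the `while nx*ny < naxes: ny += 1` loop; fuel naxes.toNat always suffices (proved below)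
def loopA (naxes nx : Int) : Nat → Int → Int
  | 0, ny => ny
  | f + 1, ny => if nx * ny < naxes then loopA naxes nx f (ny + 1) else ny

def opt_fig_div (naxes : Int) : Int × Int :=
  let nstsq := pyRoundSqrt naxes
  if nstsq ^ 2 > naxes then (nstsq, nstsq)
  else (nstsq, loopA naxes nstsq naxes.toNat nstsq)

-- ===== PORT B =====
def opt_fig_div_alt (naxes : Int) : Int × Int :=
  let s : Int := (Nat.sqrt naxes.toNat : Int)          -- math.isqrt(naxes)
  let nstsq : Int := if naxes - s * s > s then s + 1 else s
  if nstsq * nstsq < naxes then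
    (nstsq, -(PySem.Int.floordiv (-naxes) nstsq))      -- -(-naxes // nstsq)
  else (nstsq, nstsq)

-- ===== PRECONDITION & SPEC =====
-- A raises ValueError (math.sqrt of a negative) for naxes < 0; B's math.isqrt raises there too.
def Pre_opt_fig_div (naxes : Int) : Prop := 0 ≤ naxes
instance (naxes : Int) : Decidable (Pre_opt_fig_div naxes) := by unfold Pre_opt_fig_div; infer_instance
def pvWitness_opt_fig_div : Int := (7)

def Spec_opt_fig_div (naxes : Int) (out : Int × Int) : Prop := out = opt_fig_div_alt naxes
instance (naxes : Int) (out : Int × Int) : Decidable (Spec_opt_fig_div naxes out) := by unfold Spec_opt_fig_div; infer_instance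

-- ===== CLAIM (what is proved, stated in full; the proofs are below) =====
def Claim_equal_opt_fig_div : Prop := ∀ (naxes : Int), Dom_opt_fig_div naxes → Pre_opt_fig_div naxes → Spec_opt_fig_div naxes (opt_fig_div naxes)

-- ===== LEMMAS AND PROOFS =====

-- ceiling division characterisation: for nx ≥ 1, naxes ≤ nx*m ↔ ceil(naxes/nx) ≤ m
lemma ceil_le_iff (naxes nx m : Int) (hnx : 1 ≤ nx) :
    -(PySem.Int.floordiv (-naxes) nx) ≤ m ↔ naxes ≤ nx * m := by
  have h0 : (0:Int) < nx := hnx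
  rw [PySem.Int.floordiv, Int.fdiv_eq_ediv_of_nonneg _ (le_of_lt h0), neg_le,
    Int.le_ediv_iff_mul_le h0]
  constructor <;> intro h <;> nlinarith

-- the while loop computes max ny (ceil(naxes/nx)) given enough fuel
lemma loopA_eq (naxes nx : Int) (hnx : 1 ≤ nx) :
    ∀ (f : Nat) (ny : Int), (-(PySem.Int.floordiv (-naxes) nx) - ny).toNat ≤ f →
      loopA naxes nx f ny = max ny (-(PySem.Int.floordiv (-naxes) nx)) := by
  intro f
  induction f with
  | zero =>
    intro ny hf
    have : -(PySem.Int.floordiv (-naxes) nx) ≤ ny := by omega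
    simp [loopA, max_eq_left this]
  | succ f ih =>
    intro ny hf
    simp only [loopA]
    by_cases h : nx * ny < naxes
    · have hlt : ny < -(PySem.Int.floordiv (-naxes) nx) := by
        by_contra hc
        exact absurd ((ceil_le_iff naxes nx ny hnx).mp (by omega)) (not_le.mpr h)
      rw [if_pos h, ih (ny + 1) (by omega)]
      omega
    · have : -(PySem.Int.floordiv (-naxes) nx) ≤ ny :=
        (ceil_le_iff naxes nx ny hnx).mpr (not_lt.mp h)
      rw [if_neg h, max_eq_left this]

theorem opt_fig_div_spec : Claim_equal_opt_fig_div := by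
  intro naxes _ hpre
  unfold Spec_opt_fig_div opt_fig_div opt_fig_div_alt pyRoundSqrt
  set r : Int := (Nat.sqrt naxes.toNat : Int) with hr
  set nstsq : Int := if naxes - r * r > r then r + 1 else r with hn
  have hr0 : 0 ≤ r := by positivity
  have hn0 : 0 ≤ nstsq := by rw [hn]; split <;> omega
  have hnr : r ≤ nstsq := by rw [hn]; split <;> omega
  by_cases hgt : nstsq ^ 2 > naxes
  · rw [if_pos hgt, if_neg (by nlinarith [sq_nonneg nstsq])]
  · rw [if_neg hgt]
    have hle : nstsq * nstsq ≤ naxes := by nlinarith [not_lt.mp (by simpa [pow_two] using hgt)]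
    by_cases hlt : nstsq * nstsq < naxes
    · rw [if_pos hlt]
      -- nstsq ≥ 1: if r = 0 then naxes.toNat has sqrt 0, so naxes ≤ 0 forces nstsq = 0 only when naxes = 0
      have hnx : 1 ≤ nstsq := by
        rcases lt_or_ge 0 nstsq with h | h
        · omega
        · exfalso
          have hns : nstsq = 0 := le_antisymm (by omega) hn0
          have hr00 : r = 0 := by omega
          have : naxes ≤ 0 := by
            by_contra hc
            have h1 : 1 ≤ naxes.toNat := by omega
            have := Nat.sqrt_pos.mpr h1
            omega
          nlinarith
      set c : Int := -(PySem.Int.floordiv (-naxes) nstsq) with hc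
      have hcle : c ≤ naxes := (ceil_le_iff naxes nstsq naxes hnx).mpr (by nlinarith)
      have hfuel : (c - nstsq).toNat ≤ naxes.toNat := by omega
      rw [loopA_eq naxes nstsq hnx naxes.toNat nstsq hfuel]
      have : nstsq < c := by
        by_contra h
        exact absurd ((ceil_le_iff naxes nstsq nstsq hnx).mp (by omega)) (not_le.mpr hlt)
      rw [max_eq_right (le_of_lt this)]
    · rw [if_neg hlt]
      have heq : nstsq * nstsq = naxes := le_antisymm hle (not_lt.mp hlt)
      rcases Nat.eq_zero_or_pos naxes.toNat with h0 | h0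
      · simp only [show naxes.toNat = 0 from h0, loopA, Prod.mk.injEq]
        exact ⟨hn, hn⟩
      · obtain ⟨f, hf⟩ : ∃ f, naxes.toNat = f + 1 := ⟨naxes.toNat - 1, by omega⟩
        rw [hf]
        simp only [loopA, if_neg (not_lt.mpr (le_of_eq heq.symm)), Prod.mk.injEq]
        exact ⟨hn, hn⟩
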